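-- pv_equiv track=rewrite | github.com/Herdran/wiet | WDI/WDI_4/10.py | cw10
-- ===== SOURCE A (Python) =====
-- def cw10(n, list_):
--     for i in range(n):
--         x = 0
--         for j in range(n):
--             if list_[i][j] == 0:
--                 x = 1
--             if j == n - 1 and x == 0:
--                 return False
--     for j in range(n):
--         x = 0
--         for i in range(n):
--             if list_[i][j] == 0:
--                 x = 1
--             if i == n - 1 and x == 0:
--                 return False
--     return True
-- ===== SOURCE B (Python) =====
-- def cw10(n, list_):
--     col_has_zero = [False] * n
--     for i in range(n):
--         row_has_zero = False
--         for j in range(n):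
--             if list_[i][j] == 0:
--                 row_has_zero = True
--                 col_has_zero[j] = True
--         if not row_has_zero:
--             return False
--     return all(col_has_zero)
-- ===== Notes on version B (the rewrite author's own statement) =====
-- stated objective: alternative
-- what changed: A scans the square twice (all rows, then all columns, with an early return inside each inner loop); B makes one row-major pass, maintaining a per-row flag and a column-flag array, so every cell is read once instead of twice.
-- outside the precondition, e.g. on cw10(2, [[1, 2], [3]]): A returns False, B returns False
import Mathlib
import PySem

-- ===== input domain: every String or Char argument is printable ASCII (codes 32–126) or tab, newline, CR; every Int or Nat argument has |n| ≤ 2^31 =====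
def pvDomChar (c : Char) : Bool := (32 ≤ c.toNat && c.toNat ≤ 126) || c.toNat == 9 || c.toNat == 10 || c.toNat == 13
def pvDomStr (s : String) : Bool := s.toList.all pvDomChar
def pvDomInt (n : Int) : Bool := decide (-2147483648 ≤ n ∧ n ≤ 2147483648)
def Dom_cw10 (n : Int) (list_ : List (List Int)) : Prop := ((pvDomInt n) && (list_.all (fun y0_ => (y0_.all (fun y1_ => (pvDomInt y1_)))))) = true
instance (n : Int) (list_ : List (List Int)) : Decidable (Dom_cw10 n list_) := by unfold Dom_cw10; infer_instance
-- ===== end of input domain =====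

-- B makes one row-major pass with a column-flag array instead of A's two full passes (rows then columns); every cell is read once instead of twice.


-- ===== PORT A =====
-- list_[i][j]; exact inside Pre_cw10 (both indices in range there)
def pvCellA (list_ : List (List Int)) (i j : Int) : Int :=
  PySem.List.pyGetD (PySem.List.pyGetD list_ i []) j 0

-- inner 'for j in range(n)' of A's first loop, with the early 'return False'
def cw10_rowLoop (n : Int) (list_ : List (List Int)) (i : Int) (js : List Int) (x : Int) : Bool :=
  match js with
  | [] => true
  | j :: rest =>
    let x' := if pvCellA list_ i j == 0 then 1 else x
    if j == n - 1 && x' == 0 then false else cw10_rowLoop n list_ i rest x'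

-- outer 'for i in range(n)' of A's first loop
def cw10_rows (n : Int) (list_ : List (List Int)) (is_ : List Int) : Bool :=
  match is_ with
  | [] => true
  | i :: rest =>
    if cw10_rowLoop n list_ i (PySem.List.pyRange 0 n 1) 0 then cw10_rows n list_ rest else false

-- inner 'for i in range(n)' of A's second loop, with the early 'return False'
def cw10_colLoop (n : Int) (list_ : List (List Int)) (j : Int) (is_ : List Int) (x : Int) : Bool :=
  match is_ with
  | [] => true
  | i :: rest =>
    let x' := if pvCellA list_ i j == 0 then 1 else x
    if i == n - 1 && x' == 0 then false else cw10_colLoop n list_ j rest x'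

-- outer 'for j in range(n)' of A's second loop
def cw10_cols (n : Int) (list_ : List (List Int)) (js : List Int) : Bool :=
  match js with
  | [] => true
  | j :: rest =>
    if cw10_colLoop n list_ j (PySem.List.pyRange 0 n 1) 0 then cw10_cols n list_ rest else false

def cw10 (n : Int) (list_ : List (List Int)) : Bool :=
  if cw10_rows n list_ (PySem.List.pyRange 0 n 1) then cw10_cols n list_ (PySem.List.pyRange 0 n 1) else false

-- ===== PORT B =====
-- list_[i][j]; exact inside Pre_cw10 (both indices in range there)
def pvCellB (list_ : List (List Int)) (i j : Int) : Int :=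
  PySem.List.pyGetD (PySem.List.pyGetD list_ i []) j 0

-- B's inner 'for j in range(n)': returns (row_has_zero, updated col_has_zero);
-- col_has_zero[j] = True is List.set (j from range(n) is nonnegative, so .toNat is exact)
def cw10_alt_rowLoop (list_ : List (List Int)) (i : Int) (js : List Int) (rowHas : Bool) (col : List Bool) : Bool × List Bool :=
  match js with
  | [] => (rowHas, col)
  | j :: rest =>
    if pvCellB list_ i j == 0 then cw10_alt_rowLoop list_ i rest true (col.set j.toNat true)
    else cw10_alt_rowLoop list_ i rest rowHas col

-- B's outer 'for i in range(n)' with the early 'return False'; at the end 'all(col_has_zero)'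
def cw10_alt_outer (n : Int) (list_ : List (List Int)) (is_ : List Int) (col : List Bool) : Bool :=
  match is_ with
  | [] => col.all id
  | i :: rest =>
    let r := cw10_alt_rowLoop list_ i (PySem.List.pyRange 0 n 1) false col
    if r.1 then cw10_alt_outer n list_ rest r.2 else false

-- '[False] * n' is List.replicate n.toNat false (empty for n ≤ 0, as in Python)
def cw10_alt (n : Int) (list_ : List (List Int)) : Bool :=
  cw10_alt_outer n list_ (PySem.List.pyRange 0 n 1) (List.replicate n.toNat false)

-- ===== PRECONDITION & SPEC =====
-- Pre_ excludes jagged inputs (fewer than n rows, or one of the first n rows shorter than n):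
-- on almost all of them both A and B raise IndexError; on the fringe where a zero-free earlier
-- row makes A return False before reaching the short row, B returns False too, but the access
-- pattern is not worth carving into the claim, so the whole jagged region is excluded.
def Pre_cw10 (n : Int) (list_ : List (List Int)) : Prop :=
  n ≤ 0 ∨ (n ≤ (list_.length : Int) ∧ ∀ row ∈ list_.take n.toNat, n ≤ (row.length : Int))
instance (n : Int) (list_ : List (List Int)) : Decidable (Pre_cw10 n list_) := by unfold Pre_cw10; infer_instance

def pvWitness_cw10 : Int × List (List Int) := (2, [[0, 1], [1, 0]])

def Spec_cw10 (n : Int) (list_ : List (List Int)) (out : Bool) : Prop := out = cw10_alt n list_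
instance (n : Int) (list_ : List (List Int)) (out : Bool) : Decidable (Spec_cw10 n list_ out) := by unfold Spec_cw10; infer_instance

-- ===== CLAIM (what is proved, stated in full; the proofs are below) =====
def Claim_equal_cw10 : Prop := ∀ (n : Int) (list_ : List (List Int)), Dom_cw10 n list_ → Pre_cw10 n list_ → Spec_cw10 n list_ (cw10 n list_)

-- ===== LEMMAS AND PROOFS =====

-- A's inner row loop over a range ending in n-1: returns "x was 1 or some cell is zero"
theorem rowLoop_append (n : Int) (list_ : List (List Int)) (i : Int) :
    ∀ (l : List Int), (n - 1) ∉ l → ∀ x : Int, (x = 0 ∨ x = 1) →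
      cw10_rowLoop n list_ i (l ++ [n - 1]) x
        = (decide (x = 1) || (l ++ [n - 1]).any (fun j => pvCellA list_ i j == 0)) := by
  intro l
  induction l with
  | nil =>
    intro _ x hx
    simp only [List.nil_append, cw10_rowLoop, List.any_cons, List.any_nil]
    rcases hx with h | h <;> subst h <;> by_cases hp : pvCellA list_ i (n-1) == 0 <;>
      simp [hp]
  | cons a l ih =>
    intro hmem x hx
    have ha : a ≠ n - 1 := by intro h; exact hmem (by simp [h])
    simp only [List.cons_append, cw10_rowLoop]
    by_cases hp : pvCellA list_ i a == 0
    · have := ih (by intro h; exact hmem (List.mem_cons_of_mem _ h)) 1 (Or.inr rfl)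
      simp [hp, ha, this]
    · have := ih (by intro h; exact hmem (List.mem_cons_of_mem _ h)) x hx
      rcases hx with h | h <;> subst h <;> simp [hp, ha, this]

theorem rowLoop_full (n : Int) (list_ : List (List Int)) (i : Int) (hn : 1 ≤ n) :
    cw10_rowLoop n list_ i (PySem.List.pyRange 0 n 1) 0
      = (PySem.List.pyRange 0 n 1).any (fun j => pvCellA list_ i j == 0) := by
  have hsplit : PySem.List.pyRange 0 n 1 = PySem.List.pyRange 0 (n-1) 1 ++ [n-1] := by
    have h := PySem.List.pyRange_one_succ_right (a := 0) (b := n - 1) (by omega)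
    have e : n - 1 + 1 = n := by omega
    rw [e] at h; exact h
  rw [hsplit]
  have hmem : (n - 1) ∉ PySem.List.pyRange 0 (n-1) 1 := by
    simp [PySem.List.mem_pyRange_one]
  simpa using rowLoop_append n list_ i _ hmem 0 (Or.inl rfl)

theorem rows_all (n : Int) (list_ : List (List Int)) :
    ∀ is_ : List Int, cw10_rows n list_ is_
      = is_.all (fun i => cw10_rowLoop n list_ i (PySem.List.pyRange 0 n 1) 0) := by
  intro is_
  induction is_ with
  | nil => rfl
  | cons i rest ih =>
    simp only [cw10_rows, List.all_cons, ih]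
    by_cases h : cw10_rowLoop n list_ i (PySem.List.pyRange 0 n 1) 0 <;> simp [h]

theorem colLoop_append (n : Int) (list_ : List (List Int)) (j : Int) :
    ∀ (l : List Int), (n - 1) ∉ l → ∀ x : Int, (x = 0 ∨ x = 1) →
      cw10_colLoop n list_ j (l ++ [n - 1]) x
        = (decide (x = 1) || (l ++ [n - 1]).any (fun i => pvCellA list_ i j == 0)) := by
  intro l
  induction l with
  | nil =>
    intro _ x hx
    simp only [List.nil_append, cw10_colLoop, List.any_cons, List.any_nil]
    rcases hx with h | h <;> subst h <;> by_cases hp : pvCellA list_ (n-1) j == 0 <;>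
      simp [hp]
  | cons a l ih =>
    intro hmem x hx
    have ha : a ≠ n - 1 := by intro h; exact hmem (by simp [h])
    simp only [List.cons_append, cw10_colLoop]
    by_cases hp : pvCellA list_ a j == 0
    · have := ih (by intro h; exact hmem (List.mem_cons_of_mem _ h)) 1 (Or.inr rfl)
      simp [hp, ha, this]
    · have := ih (by intro h; exact hmem (List.mem_cons_of_mem _ h)) x hx
      rcases hx with h | h <;> subst h <;> simp [hp, ha, this]

theorem colLoop_full (n : Int) (list_ : List (List Int)) (j : Int) (hn : 1 ≤ n) :
    cw10_colLoop n list_ j (PySem.List.pyRange 0 n 1) 0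
      = (PySem.List.pyRange 0 n 1).any (fun i => pvCellA list_ i j == 0) := by
  have hsplit : PySem.List.pyRange 0 n 1 = PySem.List.pyRange 0 (n-1) 1 ++ [n-1] := by
    have h := PySem.List.pyRange_one_succ_right (a := 0) (b := n - 1) (by omega)
    have e : n - 1 + 1 = n := by omega
    rw [e] at h; exact h
  rw [hsplit]
  have hmem : (n - 1) ∉ PySem.List.pyRange 0 (n-1) 1 := by
    simp [PySem.List.mem_pyRange_one]
  simpa using colLoop_append n list_ j _ hmem 0 (Or.inl rfl)

theorem cols_all (n : Int) (list_ : List (List Int)) :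
    ∀ js : List Int, cw10_cols n list_ js
      = js.all (fun j => cw10_colLoop n list_ j (PySem.List.pyRange 0 n 1) 0) := by
  intro js
  induction js with
  | nil => rfl
  | cons j rest ih =>
    simp only [cw10_cols, List.all_cons, ih]
    by_cases h : cw10_colLoop n list_ j (PySem.List.pyRange 0 n 1) 0 <;> simp [h]

-- B side ------------------------------------------------------------------

theorem altRowLoop_fst (list_ : List (List Int)) (i : Int) :
    ∀ (js : List Int) (rowHas : Bool) (col : List Bool),
      (cw10_alt_rowLoop list_ i js rowHas col).1
        = (rowHas || js.any (fun j => pvCellB list_ i j == 0)) := by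
  intro js
  induction js with
  | nil => intro rowHas col; simp [cw10_alt_rowLoop]
  | cons j rest ih =>
    intro rowHas col
    simp only [cw10_alt_rowLoop]
    by_cases hp : pvCellB list_ i j == 0
    · rw [if_pos hp, ih]; simp [hp]
    · rw [if_neg hp, ih]; simp [hp]

theorem altRowLoop_snd_getElem? (list_ : List (List Int)) (i : Int) :
    ∀ (js : List Int) (rowHas : Bool) (col : List Bool) (k : Nat),
      ((cw10_alt_rowLoop list_ i js rowHas col).2)[k]?
        = (col[k]?).map (fun b => b || js.any (fun j => decide (j.toNat = k) && (pvCellB list_ i j == 0))) := by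
  intro js
  induction js with
  | nil =>
    intro rowHas col k
    cases h : col[k]? <;> simp [cw10_alt_rowLoop, h]
  | cons j rest ih =>
    intro rowHas col k
    simp only [cw10_alt_rowLoop]
    by_cases hp : pvCellB list_ i j == 0
    · rw [if_pos hp, ih]
      by_cases hk : j.toNat = k
      · subst hk
        by_cases hlen : j.toNat < col.length
        · simp [hlen, hp]
        · have h1 : (col.set j.toNat true)[j.toNat]? = none := by
            simp; omega
          have h2 : col[j.toNat]? = none := by simp; omega
          simp [h1, h2]
      · have hset : (col.set j.toNat true)[k]? = col[k]? := by
          rw [List.getElem?_set, if_neg hk]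
        rw [hset]
        cases h : col[k]? <;> simp [hk, hp]
    · rw [if_neg hp, ih]
      cases h : col[k]? <;> simp [hp]

def colFold (n : Int) (list_ : List (List Int)) (is_ : List Int) (col : List Bool) : List Bool :=
  is_.foldl (fun c i => (cw10_alt_rowLoop list_ i (PySem.List.pyRange 0 n 1) false c).2) col

theorem altOuter_eq (n : Int) (list_ : List (List Int)) :
    ∀ (is_ : List Int) (col : List Bool),
      cw10_alt_outer n list_ is_ col
        = (is_.all (fun i => (PySem.List.pyRange 0 n 1).any (fun j => pvCellB list_ i j == 0))
            && (colFold n list_ is_ col).all id) := by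
  intro is_
  induction is_ with
  | nil => intro col; simp [cw10_alt_outer, colFold]
  | cons i rest ih =>
    intro col
    simp only [cw10_alt_outer, altRowLoop_fst, Bool.false_or, List.all_cons]
    by_cases h : (PySem.List.pyRange 0 n 1).any (fun j => pvCellB list_ i j == 0)
    · rw [if_pos h, ih, h]
      simp only [Bool.true_and]
      rfl
    · rw [if_neg h]
      rcases Bool.eq_false_iff.mpr h with _
      have : ((PySem.List.pyRange 0 n 1).any (fun j => pvCellB list_ i j == 0)) = false :=
        Bool.eq_false_iff.mpr h
      rw [this]; simp

theorem colFold_getElem? (n : Int) (list_ : List (List Int)) :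
    ∀ (is_ : List Int) (col : List Bool) (k : Nat),
      (colFold n list_ is_ col)[k]?
        = (col[k]?).map (fun b => b ||
            is_.any (fun i => (PySem.List.pyRange 0 n 1).any (fun j => decide (j.toNat = k) && (pvCellB list_ i j == 0)))) := by
  intro is_
  induction is_ with
  | nil => intro col k; cases h : col[k]? <;> simp [colFold, h]
  | cons i rest ih =>
    intro col k
    simp only [colFold, List.foldl_cons]
    rw [show (rest.foldl (fun c i => (cw10_alt_rowLoop list_ i (PySem.List.pyRange 0 n 1) false c).2)
          ((cw10_alt_rowLoop list_ i (PySem.List.pyRange 0 n 1) false col).2)) =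
        colFold n list_ rest ((cw10_alt_rowLoop list_ i (PySem.List.pyRange 0 n 1) false col).2) from rfl]
    rw [ih, altRowLoop_snd_getElem?]
    cases h : col[k]? <;> simp [Bool.or_assoc]

theorem any_toNat_collapse (n : Int) (list_ : List (List Int)) (i : Int) (k : Nat)
    (hk : (k : Int) < n) :
    (PySem.List.pyRange 0 n 1).any (fun j => decide (j.toNat = k) && (pvCellB list_ i j == 0))
      = (pvCellB list_ i (k : Int) == 0) := by
  rw [Bool.eq_iff_iff]
  simp only [List.any_eq_true, PySem.List.mem_pyRange_one, Bool.and_eq_true, decide_eq_true_eq]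
  constructor
  · rintro ⟨j, ⟨hj0, hjn⟩, hjk, hp⟩
    have : j = (k : Int) := by omega
    rwa [this] at hp
  · intro hp
    exact ⟨(k : Int), ⟨by omega, hk⟩, by omega, hp⟩

-- the final col_has_zero array is exactly the per-column 'has a zero' table
theorem colFold_eq_map (n : Int) (list_ : List (List Int)) :
    colFold n list_ (PySem.List.pyRange 0 n 1) (List.replicate n.toNat false)
      = (PySem.List.pyRange 0 n 1).map
          (fun j => (PySem.List.pyRange 0 n 1).any (fun i => pvCellB list_ i j == 0)) := by
  apply List.ext_getElem?
  intro k
  rw [colFold_getElem?, List.getElem?_map, PySem.List.getElem?_pyRange_one]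
  by_cases hk : k < n.toNat
  · have hrep : (List.replicate n.toNat false)[k]? = some false := by
      simp [hk]
    rw [hrep, if_pos (by omega)]
    simp only [Option.map_some, Bool.false_or, Option.some.injEq, Int.zero_add]
    apply List.any_congr rfl
    intro i
    exact any_toNat_collapse n list_ i k (by omega)
  · have hrep : (List.replicate n.toNat false)[k]? = none := by
      simp; omega
    rw [hrep, if_neg (by omega)]
    rfl

theorem cellB_eq_cellA : pvCellB = pvCellA := rfl

theorem cw10_eq_alt (n : Int) (list_ : List (List Int)) : cw10 n list_ = cw10_alt n list_ := by
  by_cases hn : 1 ≤ n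
  · have hrows : cw10_rows n list_ (PySem.List.pyRange 0 n 1)
        = (PySem.List.pyRange 0 n 1).all
            (fun i => (PySem.List.pyRange 0 n 1).any (fun j => pvCellA list_ i j == 0)) := by
      rw [rows_all]
      exact List.all_congr rfl (fun i => rowLoop_full n list_ i hn)
    have hcols : cw10_cols n list_ (PySem.List.pyRange 0 n 1)
        = (PySem.List.pyRange 0 n 1).all
            (fun j => (PySem.List.pyRange 0 n 1).any (fun i => pvCellA list_ i j == 0)) := by
      rw [cols_all]
      exact List.all_congr rfl (fun j => colLoop_full n list_ j hn)
    rw [cw10, cw10_alt, altOuter_eq, colFold_eq_map, hrows, hcols, cellB_eq_cellA,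
        List.all_map]
    by_cases hR : (PySem.List.pyRange 0 n 1).all
        (fun i => (PySem.List.pyRange 0 n 1).any (fun j => pvCellA list_ i j == 0))
    · rw [hR, if_pos rfl, Bool.true_and]
      simp
    · have : ((PySem.List.pyRange 0 n 1).all
          (fun i => (PySem.List.pyRange 0 n 1).any (fun j => pvCellA list_ i j == 0))) = false :=
        Bool.eq_false_iff.mpr hR
      rw [this]
      simp
  · have hr : PySem.List.pyRange 0 n 1 = [] := PySem.List.pyRange_one_eq_nil (by omega)
    have ht : n.toNat = 0 := by omega
    rw [cw10, cw10_alt, hr, ht]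
    rfl

-- ===== VERDICT (by name: the statement is the Claim_ definition above) =====
theorem cw10_spec : Claim_equal_cw10 := by
  intro n list_ _ _
  unfold Spec_cw10
  exact cw10_eq_alt n list_
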